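-- pv_equiv track=rewrite | github.com/TheBottles/Agents | AStar2.py | connecting_points
-- ===== SOURCE A (Python) =====
-- def connecting_points(Current, Points):
--     connections = []
--     for P in Points:
--         if (P[0] == Current[0] + 1) and (P[1] == Current[1]):
--             connections.append(tuple(P))
--         elif (P[0] == Current[0] - 1) and (P[1] == Current[1]):
--             connections.append(tuple(P))
--         elif (P[0] == Current[0]) and (P[1] == Current[1] + 1):
--             connections.append(tuple(P))
--         elif (P[0] == Current[0]) and (P[1] == Current[1] - 1):
--             connections.append(tuple(P))
--     return connections
-- ===== SOURCE B (Python) =====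
-- def connecting_points(Current, Points):
--     # Build a hash index: coordinate -> list of (position, tuple(P)) occurrences.
--     index = {}
--     for i, P in enumerate(Points):
--         key = (P[0], P[1])
--         index[key] = index.get(key, []) + [(i, tuple(P))]
--     cx, cy = Current[0], Current[1]
--     # Look up only the four neighbor coordinates, then restore input order.
--     hits = []
--     for n in ((cx + 1, cy), (cx - 1, cy), (cx, cy + 1), (cx, cy - 1)):
--         hits.extend(index.get(n, []))
--     hits.sort(key=lambda e: e[0])
--     return [t for _, t in hits]
-- ===== Notes on version B (the rewrite author's own statement) =====
-- stated objective: alternative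
-- what changed: Instead of scanning Points and testing each against four branches, B builds a dict index from coordinate to occurrences (with positions), looks up only the four neighbor coordinates, and sorts the collected hits by original position to restore input order and multiplicity.
import Mathlib
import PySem

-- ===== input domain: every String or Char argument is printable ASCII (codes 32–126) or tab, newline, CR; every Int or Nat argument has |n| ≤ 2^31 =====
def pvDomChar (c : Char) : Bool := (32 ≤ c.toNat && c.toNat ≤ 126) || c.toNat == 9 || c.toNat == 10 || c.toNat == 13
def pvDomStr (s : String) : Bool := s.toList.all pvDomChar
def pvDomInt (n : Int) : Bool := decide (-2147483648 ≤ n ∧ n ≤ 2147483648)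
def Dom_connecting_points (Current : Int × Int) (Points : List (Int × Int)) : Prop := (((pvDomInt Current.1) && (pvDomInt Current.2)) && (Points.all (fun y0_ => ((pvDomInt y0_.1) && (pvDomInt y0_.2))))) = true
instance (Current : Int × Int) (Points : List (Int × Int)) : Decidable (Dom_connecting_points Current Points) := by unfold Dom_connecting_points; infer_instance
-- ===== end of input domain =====

-- B replaces A's scan-and-branch filter with a coordinate-indexed dictionary queried at the four
-- neighbor keys, restoring input order by sorting hit positions (alternative algorithm, same cost class).

-- ===== PORT A =====
-- literal port of A: loop over Points accumulating connections, same four-branch order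
def connecting_points (Current : Int × Int) (Points : List (Int × Int)) : List (Int × Int) :=
  Points.foldl (fun connections P =>
    if P.1 = Current.1 + 1 ∧ P.2 = Current.2 then connections ++ [P]
    else if P.1 = Current.1 - 1 ∧ P.2 = Current.2 then connections ++ [P]
    else if P.1 = Current.1 ∧ P.2 = Current.2 + 1 then connections ++ [P]
    else if P.1 = Current.1 ∧ P.2 = Current.2 - 1 then connections ++ [P]
    else connections) []

-- ===== PORT B =====
-- port of Source B: dict index coord -> [(position, point)], look up the four neighbor coords,
-- sort hits by position, project the points
def connecting_points_alt (Current : Int × Int) (Points : List (Int × Int)) : List (Int × Int) :=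
  let index := (PySem.List.enumerate Points).foldl
      (fun d e => d.modify (e.2.1, e.2.2) [] (· ++ [e])) PySem.Dict.empty
  let cx := Current.1
  let cy := Current.2
  let hits := [(cx + 1, cy), (cx - 1, cy), (cx, cy + 1), (cx, cy - 1)].foldl
      (fun h n => h ++ index.getD n []) []
  (PySem.List.sorted hits (fun e => e.1) false).map (fun e => e.2)

-- ===== PRECONDITION & SPEC =====
def Spec_connecting_points (Current : Int × Int) (Points : List (Int × Int)) (out : List (Int × Int)) : Prop := out = connecting_points_alt Current Points
instance (Current : Int × Int) (Points : List (Int × Int)) (out : List (Int × Int)) : Decidable (Spec_connecting_points Current Points out) := by unfold Spec_connecting_points; infer_instance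

-- ===== CLAIM (what is proved, stated in full; the proofs are below) =====
def Claim_equal_connecting_points : Prop := ∀ (Current : Int × Int) (Points : List (Int × Int)), Dom_connecting_points Current Points → Spec_connecting_points Current Points (connecting_points Current Points)

-- ===== LEMMAS AND PROOFS =====

-- the grouping fold keyed by e.2 is the generic keyed-modify fold over (key, value) pairs
theorem pv_index_getD (l : List (Int × (Int × Int))) (d : PySem.Dict (Int × Int) (List (Int × (Int × Int)))) (c : Int × Int) :
    (l.foldl (fun d e => d.modify (e.2.1, e.2.2) [] (· ++ [e])) d).getD c []
      = d.getD c [] ++ (l.filter (fun e => (e.2.1, e.2.2) == c)) := by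
  induction l generalizing d with
  | nil => simp
  | cons e t ih =>
    simp only [List.foldl_cons, List.filter_cons, ih]
    by_cases h : (e.2.1, e.2.2) = c
    · simp [h, PySem.Dict.getD_modify]
    · have hb : ((e.2.1, e.2.2) == c) = false := by simpa using h
      have h' : c ≠ e.2 := by simpa [eq_comm] using h
      simp [hb, PySem.Dict.getD_modify, h']

-- disjoint filters concatenate to the filter of the disjunction, up to permutation
theorem pv_filter_or_perm {α : Type} (p q : α → Bool) (h : ∀ x, ¬(p x = true ∧ q x = true))
    (l : List α) : (l.filter (fun x => p x || q x)).Perm (l.filter p ++ l.filter q) := by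
  induction l with
  | nil => simp
  | cons x t ih =>
    simp only [List.filter_cons]
    cases hp : p x with
    | true =>
      have hq : q x = false := by
        cases hq : q x
        · rfl
        · exact absurd ⟨hp, hq⟩ (h x)
      simpa [hp, hq] using ih.cons x
    | false =>
      cases hq : q x with
      | true =>
        simp only [Bool.false_or]
        exact (ih.cons x).trans (List.perm_middle.symm)
      | false => simpa [hp, hq] using ih

-- projecting the point out of a filtered enumeration is filtering the points
theorem pv_map_snd_filter_enumerate (xs : List (Int × Int)) (s : Int) (q : (Int × Int) → Bool) :
    (((PySem.List.enumerate xs s).filter (fun e => q e.2)).map (fun e => e.2)) = xs.filter q := by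
  induction xs generalizing s with
  | nil => simp [PySem.List.enumerate_nil]
  | cons x t ih =>
    simp only [PySem.List.enumerate_cons, List.filter_cons]
    cases hq : q x
    · simpa [hq] using ih (s + 1)
    · simpa [hq] using ih (s + 1)

-- A's four-branch chain is the filter by "is one of the four neighbor coordinates"
theorem pv_a_filter (C : Int × Int) (Points : List (Int × Int)) :
    connecting_points C Points
      = Points.filter (fun P => ((P.1, P.2) == (C.1 + 1, C.2)) || ((P.1, P.2) == (C.1 - 1, C.2))
          || ((P.1, P.2) == (C.1, C.2 + 1)) || ((P.1, P.2) == (C.1, C.2 - 1))) := by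
  unfold connecting_points
  have h : ∀ (l : List (Int × Int)) (acc : List (Int × Int)),
      l.foldl (fun connections P =>
        if P.1 = C.1 + 1 ∧ P.2 = C.2 then connections ++ [P]
        else if P.1 = C.1 - 1 ∧ P.2 = C.2 then connections ++ [P]
        else if P.1 = C.1 ∧ P.2 = C.2 + 1 then connections ++ [P]
        else if P.1 = C.1 ∧ P.2 = C.2 - 1 then connections ++ [P]
        else connections) acc
      = acc ++ l.filter (fun P => ((P.1, P.2) == (C.1 + 1, C.2)) || ((P.1, P.2) == (C.1 - 1, C.2))
          || ((P.1, P.2) == (C.1, C.2 + 1)) || ((P.1, P.2) == (C.1, C.2 - 1))) := by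
    intro l
    induction l with
    | nil => simp
    | cons P t ih =>
      intro acc
      have hstep : (if P.1 = C.1 + 1 ∧ P.2 = C.2 then acc ++ [P]
          else if P.1 = C.1 - 1 ∧ P.2 = C.2 then acc ++ [P]
          else if P.1 = C.1 ∧ P.2 = C.2 + 1 then acc ++ [P]
          else if P.1 = C.1 ∧ P.2 = C.2 - 1 then acc ++ [P]
          else acc)
          = (if (((P.1, P.2) == (C.1 + 1, C.2)) || ((P.1, P.2) == (C.1 - 1, C.2))
              || ((P.1, P.2) == (C.1, C.2 + 1)) || ((P.1, P.2) == (C.1, C.2 - 1))) = true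
             then acc ++ [P] else acc) := by
        simp only [beq_iff_eq, Prod.mk.injEq, Bool.or_eq_true]
        split_ifs <;> first | rfl | omega
      simp only [List.foldl_cons, List.filter_cons, hstep]
      by_cases hb : (((P.1, P.2) == (C.1 + 1, C.2)) || ((P.1, P.2) == (C.1 - 1, C.2))
          || ((P.1, P.2) == (C.1, C.2 + 1)) || ((P.1, P.2) == (C.1, C.2 - 1))) = true
      · simp [hb, ih]
      · simp only [hb]
        simp only [Bool.not_eq_true] at hb
        simp [ih]
  simpa using h Points []

-- ===== VERDICT (by name: the statement is the Claim_ definition above) =====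
theorem connecting_points_spec : Claim_equal_connecting_points := by
  intro C Points _
  unfold Spec_connecting_points connecting_points_alt
  simp only []
  set E := PySem.List.enumerate Points with hE
  set n1 : Int × Int := (C.1 + 1, C.2)
  set n2 : Int × Int := (C.1 - 1, C.2)
  set n3 : Int × Int := (C.1, C.2 + 1)
  set n4 : Int × Int := (C.1, C.2 - 1)
  -- the four neighbor coordinates are pairwise distinct
  have h12 : n1 ≠ n2 := by simp [n1, n2, Prod.ext_iff]; omega
  have h13 : n1 ≠ n3 := by simp [n1, n3, Prod.ext_iff]
  have h14 : n1 ≠ n4 := by simp [n1, n4, Prod.ext_iff]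
  have h23 : n2 ≠ n3 := by simp [n2, n3, Prod.ext_iff]
  have h24 : n2 ≠ n4 := by simp [n2, n4, Prod.ext_iff]
  have h34 : n3 ≠ n4 := by simp [n3, n4, Prod.ext_iff]; omega
  -- each dict lookup is a filter of the enumeration
  have hget : ∀ c, ((E.foldl (fun d e => d.modify (e.2.1, e.2.2) [] (· ++ [e])) PySem.Dict.empty).getD c [])
      = E.filter (fun e => (e.2.1, e.2.2) == c) := by
    intro c; simpa using pv_index_getD E PySem.Dict.empty c
  -- the combined filter predicate
  set pAll : (Int × (Int × Int)) → Bool :=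
    fun e => ((e.2.1, e.2.2) == n1) || ((e.2.1, e.2.2) == n2) || ((e.2.1, e.2.2) == n3) || ((e.2.1, e.2.2) == n4)
  have hdisj : ∀ (a b : Int × Int), a ≠ b → ∀ e : Int × (Int × Int),
      ¬(((e.2.1, e.2.2) == a) = true ∧ ((e.2.1, e.2.2) == b) = true) := by
    intro a b hab e ⟨ha, hb⟩
    exact hab (by rw [← (beq_iff_eq.mp ha), (beq_iff_eq.mp hb)])
  -- the hits list is a permutation of the combined filter
  have hperm : (E.filter pAll).Perm
      (((E.filter (fun e => (e.2.1, e.2.2) == n1) ++ E.filter (fun e => (e.2.1, e.2.2) == n2))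
        ++ E.filter (fun e => (e.2.1, e.2.2) == n3)) ++ E.filter (fun e => (e.2.1, e.2.2) == n4)) := by
    have s4 := pv_filter_or_perm
      (fun e : Int × (Int × Int) => ((e.2.1, e.2.2) == n1) || ((e.2.1, e.2.2) == n2) || ((e.2.1, e.2.2) == n3))
      (fun e => (e.2.1, e.2.2) == n4)
      (by intro e ⟨h, h4⟩
          simp only [Bool.or_eq_true] at h
          rcases h with (h | h) | h
          · exact hdisj n1 n4 h14 e ⟨h, h4⟩
          · exact hdisj n2 n4 h24 e ⟨h, h4⟩
          · exact hdisj n3 n4 h34 e ⟨h, h4⟩) E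
    have s3 := pv_filter_or_perm
      (fun e : Int × (Int × Int) => ((e.2.1, e.2.2) == n1) || ((e.2.1, e.2.2) == n2))
      (fun e => (e.2.1, e.2.2) == n3)
      (by intro e ⟨h, h3⟩
          simp only [Bool.or_eq_true] at h
          rcases h with h | h
          · exact hdisj n1 n3 h13 e ⟨h, h3⟩
          · exact hdisj n2 n3 h23 e ⟨h, h3⟩) E
    have s2 := pv_filter_or_perm
      (fun e : Int × (Int × Int) => (e.2.1, e.2.2) == n1)
      (fun e => (e.2.1, e.2.2) == n2)
      (fun e => hdisj n1 n2 h12 e) E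
    exact s4.trans (((s3.trans (s2.append_right _)).append_right _))
  -- the sorted hits equal the combined filter (strictly increasing positions)
  have hpair : (E.filter pAll).Pairwise (fun a b : Int × (Int × Int) => a.1 < b.1) :=
    (PySem.List.pairwise_lt_enumerate Points 0).filter _
  have hsorted : PySem.List.sorted
      (((E.filter (fun e => (e.2.1, e.2.2) == n1) ++ E.filter (fun e => (e.2.1, e.2.2) == n2))
        ++ E.filter (fun e => (e.2.1, e.2.2) == n3)) ++ E.filter (fun e => (e.2.1, e.2.2) == n4))
      (fun e => e.1) false = E.filter pAll :=
    by exact PySem.List.sorted_eq_of_perm_of_pairwise_lt _ _ _ hperm hpair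
  -- assemble
  rw [pv_a_filter]
  show Points.filter _ = _
  simp only [List.foldl_cons, List.foldl_nil, List.nil_append, hget]
  rw [hsorted]
  have := pv_map_snd_filter_enumerate Points 0
      (fun P => ((P.1, P.2) == n1) || ((P.1, P.2) == n2) || ((P.1, P.2) == n3) || ((P.1, P.2) == n4))
  rw [← hE] at this
  exact this.symm
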